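-- pv_equiv track=rewrite | github.com/mogyorosibalin/2048 | app.py | move_board_horizontal
-- ===== SOURCE A (Python) =====
-- def move_board_horizontal(board):
--     for i in range(len(board)):
--         for j in range(len(board[i]) - 1):
--             same = same_after_tile(j, board[i])
--             if isinstance(same, int):
--                 board[i][j] *= 2
--                 board[i][same] = 0
--         for j in range(len(board[i])):
--             leading_zeros = count_leading_zeros(board[i], j)
--             if leading_zeros != 0:
--                 board[i] = shift_tiles_left(board[i], leading_zeros, j)
--     return board
--
-- def same_after_tile(index, row):
--     for i in range(index + 1, len(row)):
--         if row[i] == 0: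
--             continue
--         elif row[i] == row[index]:
--             return i
--         else:
--             return None
--
-- def count_leading_zeros(row, index):
--     for i in range(0, len(row) - index):
--         if row[i + index] != 0:
--             return i
--     return 0
--
-- def shift_tiles_left(row, num, index):
--     for i in range(index, len(row) - num):
--         row[i], row[i + num] = row[i + num], 0
--     return row
-- ===== SOURCE B (Python) =====
-- def move_board_horizontal(board):
--     # Single pass per row: skip zeros, merge a pending tile with an equal
--     # neighbour once, then pad with zeros.  Rebinds board[i] (A mutates the
--     # row lists in place); the return value is identical.
--     for i, row in enumerate(board):
--         out = []
--         last = None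
--         for v in row:
--             if v == 0:
--                 continue
--             if last is None:
--                 last = v
--             elif last == v:
--                 out.append(2 * v)
--                 last = None
--             else:
--                 out.append(last)
--                 last = v
--         if last is not None:
--             out.append(last)
--         board[i] = out + [0] * (len(row) - len(out))
--     return board
-- ===== Notes on version B (the rewrite author's own statement) =====
-- stated objective: faster
-- what changed: A merges by scanning ahead for each index and then repeatedly counts and shifts leading zeros (nested scans per row); B does one linear pass per row that skips zeros, merges a pending tile with an equal neighbour, and pads with zeros.
import Mathlib
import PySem

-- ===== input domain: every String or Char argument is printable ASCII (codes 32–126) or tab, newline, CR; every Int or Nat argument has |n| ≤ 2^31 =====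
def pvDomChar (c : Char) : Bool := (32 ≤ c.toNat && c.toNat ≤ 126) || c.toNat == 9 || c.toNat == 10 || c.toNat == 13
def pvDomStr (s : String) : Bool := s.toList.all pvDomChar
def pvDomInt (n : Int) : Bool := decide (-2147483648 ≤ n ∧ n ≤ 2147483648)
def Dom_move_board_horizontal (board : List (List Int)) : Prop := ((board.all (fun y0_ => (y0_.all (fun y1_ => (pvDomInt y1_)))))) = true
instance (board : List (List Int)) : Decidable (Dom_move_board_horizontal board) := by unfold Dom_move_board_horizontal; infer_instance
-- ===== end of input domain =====

-- B replaces A's quadratic per-row merge/shift scans by one linear compress-and-merge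
-- pass per row (objective: faster). Equivalence is about the RETURN value; the Python A
-- mutates the row lists in place, B rebinds board[i] instead.

-- ===== PORT A =====
-- Each Python `for i in range(a, b)` runs b - a times; the ports recurse on that
-- iteration count (`fuel`, computed exactly as Python computes the range) with the
-- same loop state, body and exit conditions.

-- same_after_tile's scan loop (i from index+1 while i < len(row))
def sameAfterGo (row : List Int) (v : Int) (i : Nat) : Nat → Option Nat
  | 0 => none
  | fuel + 1 =>
    if i < row.length then
      if row.getD i 0 = 0 then sameAfterGo row v (i + 1) fuel
      else if row.getD i 0 = v then some i
      else none
    else none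

def same_after_tile (index : Nat) (row : List Int) : Option Nat :=
  sameAfterGo row (row.getD index 0) (index + 1) row.length

-- count_leading_zeros's loop: for i in range(0, len(row) - index)
def clzGo (row : List Int) (index i : Nat) : Nat → Nat
  | 0 => 0
  | fuel + 1 =>
    if row.getD (i + index) 0 ≠ 0 then i else clzGo row index (i + 1) fuel

def count_leading_zeros (row : List Int) (index : Nat) : Nat :=
  clzGo row index 0 (row.length - index)

-- shift_tiles_left's loop: for i in range(index, len(row) - num): row[i], row[i+num] = row[i+num], 0
def shiftGo (row : List Int) (num i : Nat) : Nat → List Int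
  | 0 => row
  | fuel + 1 => shiftGo ((row.set i (row.getD (i + num) 0)).set (i + num) 0) num (i + 1) fuel

def shift_tiles_left (row : List Int) (num index : Nat) : List Int :=
  shiftGo row num index (row.length - num - index)

-- first inner loop of A: for j in range(len(row) - 1)
def mergeLoop (row : List Int) (j : Nat) : Nat → List Int
  | 0 => row
  | fuel + 1 =>
    mergeLoop
      (match same_after_tile j row with
        | some s => (row.set j (2 * row.getD j 0)).set s 0
        | none => row) (j + 1) fuel

-- second inner loop of A: for j in range(len(row))
def shiftLoop (row : List Int) (j : Nat) : Nat → List Int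
  | 0 => row
  | fuel + 1 =>
    shiftLoop
      (if count_leading_zeros row j ≠ 0 then shift_tiles_left row (count_leading_zeros row j) j
       else row) (j + 1) fuel

def move_board_horizontal (board : List (List Int)) : List (List Int) :=
  board.map (fun r =>
    let m := mergeLoop r 0 (r.length - 1)
    shiftLoop m 0 m.length)

-- ===== PORT B =====
-- the single pass over a row: `last` is the pending unmerged tile
def mergeRowGo : List Int → Option Int → List Int
  | [], none => []
  | [], some l => [l]
  | v :: rest, last =>
    if v = 0 then mergeRowGo rest last
    else
      match last with
      | none => mergeRowGo rest (some v)
      | some l =>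
        if l = v then (2 * v) :: mergeRowGo rest none
        else l :: mergeRowGo rest (some v)

def move_board_horizontal_alt (board : List (List Int)) : List (List Int) :=
  board.map (fun row =>
    let out := mergeRowGo row none
    out ++ List.replicate (row.length - out.length) 0)

-- ===== PRECONDITION & SPEC =====
def Spec_move_board_horizontal (board : List (List Int)) (out : List (List Int)) : Prop := out = move_board_horizontal_alt board
instance (board : List (List Int)) (out : List (List Int)) : Decidable (Spec_move_board_horizontal board out) := by unfold Spec_move_board_horizontal; infer_instance

-- ===== CLAIM (what is proved, stated in full; the proofs are below) =====
def Claim_equal_move_board_horizontal : Prop := ∀ (board : List (List Int)), Dom_move_board_horizontal board → Spec_move_board_horizontal board (move_board_horizontal board)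

-- ===== LEMMAS AND PROOFS =====

-- proof-side vocabulary: leading zeros, first nonzero, zero-out the first nonzero,
-- greedy pairwise merge of the nonzero subsequence, and a structural description of A's merge loop
def leadZ : List Int → Nat
  | [] => 0
  | x :: t => if x = 0 then leadZ t + 1 else 0

def firstNZ : List Int → Option Int
  | [] => none
  | x :: t => if x = 0 then firstNZ t else some x

def zeroFirstNZ : List Int → List Int
  | [] => []
  | x :: t => if x = 0 then x :: zeroFirstNZ t else 0 :: t

def pairMerge : List Int → List Int
  | [] => []
  | [a] => [a]
  | a :: b :: t => if a = b then (2 * a) :: pairMerge t else a :: pairMerge (b :: t)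

theorem length_zeroFirstNZ (l : List Int) : (zeroFirstNZ l).length = l.length := by
  induction l with
  | nil => rfl
  | cons x t ih => simp only [zeroFirstNZ]; split <;> simp [ih]

def mspec : List Int → List Int
  | [] => []
  | v :: rest =>
    if v = 0 then 0 :: mspec rest
    else
      match firstNZ rest with
      | none => v :: mspec rest
      | some x => if x = v then (2 * v) :: mspec (zeroFirstNZ rest) else v :: mspec rest
termination_by l => l.length
decreasing_by all_goals simp [length_zeroFirstNZ]

theorem firstNZ_ne_zero {l : List Int} {x : Int} (h : firstNZ l = some x) : x ≠ 0 := by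
  induction l with
  | nil => simp [firstNZ] at h
  | cons y t ih =>
    simp only [firstNZ] at h
    split at h
    · exact ih h
    · cases h; assumption

theorem firstNZ_eq_head_filter (l : List Int) : firstNZ l = (l.filter (fun v => v != 0)).head? := by
  induction l with
  | nil => rfl
  | cons y t ih =>
    simp only [firstNZ, List.filter_cons]
    by_cases hy : y = 0 <;> simp [hy, ih]

theorem firstNZ_none_filter {l : List Int} (h : firstNZ l = none) : l.filter (fun v => v != 0) = [] := by
  rw [firstNZ_eq_head_filter] at h
  simpa using h

theorem filter_zeroFirstNZ (l : List Int) :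
    (zeroFirstNZ l).filter (fun v => v != 0) = (l.filter (fun v => v != 0)).tail := by
  induction l with
  | nil => rfl
  | cons y t ih =>
    simp only [zeroFirstNZ, List.filter_cons]
    by_cases hy : y = 0 <;> simp [hy, ih]

theorem set_leadZ {l : List Int} {x : Int} (h : firstNZ l = some x) :
    l.set (leadZ l) 0 = zeroFirstNZ l := by
  induction l with
  | nil => simp [firstNZ] at h
  | cons y t ih =>
    simp only [firstNZ] at h
    simp only [leadZ, zeroFirstNZ]
    by_cases hy : y = 0
    · simp only [if_pos hy, List.set_cons_succ]
      rw [ih (by simpa [hy] using h)]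
    · simp [hy]

theorem firstNZ_decomp {l : List Int} {x : Int} (h : firstNZ l = some x) :
    ∃ t, l = List.replicate (leadZ l) 0 ++ x :: t := by
  induction l with
  | nil => simp [firstNZ] at h
  | cons y t ih =>
    simp only [firstNZ] at h
    by_cases hy : y = 0
    · obtain ⟨t', ht'⟩ := ih (by simpa [hy] using h)
      refine ⟨t', ?_⟩
      rw [show leadZ (y :: t) = leadZ t + 1 from by simp [leadZ, hy], List.replicate_succ]
      subst hy
      exact congrArg (List.cons 0) ht'
    · simp only [if_neg hy] at h
      cases h
      exact ⟨t, by simp [leadZ, hy]⟩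

theorem set_at_len (l₁ l₂ : List Int) (y a : Int) : (l₁ ++ y :: l₂).set l₁.length a = l₁ ++ a :: l₂ := by
  simp

theorem getD_at_len (l₁ l₂ : List Int) (y d : Int) : (l₁ ++ y :: l₂).getD l₁.length d = y := by
  simp

theorem set_at_len_add (l₁ l₂ : List Int) (k : Nat) (a : Int) :
    (l₁ ++ l₂).set (l₁.length + k) a = l₁ ++ l₂.set k a := by
  simp

theorem append_cons_eq (pre t : List Int) (x : Int) : pre ++ x :: t = (pre ++ [x]) ++ t := by
  simp

theorem sameAfterGo_eq (rest : List Int) : ∀ (pre : List Int) (v : Int) (fuel : Nat),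
    rest.length ≤ fuel →
    sameAfterGo (pre ++ rest) v pre.length fuel =
      match firstNZ rest with
      | none => none
      | some x => if x = v then some (pre.length + leadZ rest) else none := by
  induction rest with
  | nil =>
    intro pre v fuel _
    cases fuel with
    | zero => rfl
    | succ f =>
      simp only [sameAfterGo]
      rw [if_neg (by simp)]
      rfl
  | cons x t ih =>
    intro pre v fuel hfuel
    obtain ⟨f, rfl⟩ : ∃ f, fuel = f + 1 := ⟨fuel - 1, by simp at hfuel; omega⟩
    simp only [sameAfterGo]
    rw [if_pos (by simp)]
    rw [getD_at_len]
    by_cases hx : x = 0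
    · rw [if_pos hx]
      rw [append_cons_eq, show pre.length + 1 = (pre ++ [x]).length from by simp]
      rw [ih (pre ++ [x]) v f (by simp at hfuel; omega)]
      cases hf : firstNZ t with
      | none => simp [firstNZ, hx, hf]
      | some y =>
        simp only [firstNZ, if_pos hx, hf, leadZ, List.length_append, List.length_cons,
          List.length_nil]
        split <;> simp <;> omega
    · rw [if_neg hx]
      simp [firstNZ, leadZ, hx]

theorem clzGo_eq (suf pre : List Int) : ∀ (fuel i : Nat), i + fuel = suf.length →
    clzGo (pre ++ suf) pre.length i fuel =
      match firstNZ (suf.drop i) with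
      | none => 0
      | some _ => i + leadZ (suf.drop i) := by
  intro fuel
  induction fuel generalizing suf pre with
  | zero =>
    intro i h
    rw [List.drop_eq_nil_of_le (by omega)]
    rfl
  | succ f ih =>
    intro i h
    have hi : i < suf.length := by omega
    simp only [clzGo]
    have hg : (pre ++ suf).getD (i + pre.length) 0 = suf[i] := by
      rw [List.getD_append_right _ _ _ _ (by omega)]
      rw [List.getD_eq_getElem _ _ (by omega)]
      congr 1
      omega
    have hdrop : suf.drop i = suf[i] :: suf.drop (i + 1) := (List.getElem_cons_drop hi).symm
    rw [hg]
    by_cases hz : suf[i] = 0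
    · rw [if_neg (by simpa using hz)]
      rw [ih suf pre (i + 1) (by omega)]
      rw [hdrop]
      cases hf : firstNZ (suf.drop (i + 1)) with
      | none => simp [firstNZ, hz, hf]
      | some y => simp [firstNZ, leadZ, hz, hf]; ring
    · rw [if_pos (by simpa using hz)]
      rw [hdrop]
      simp [firstNZ, leadZ, hz]

theorem shiftGo_inv (tail : List Int) : ∀ (P moved : List Int) (num : Nat), 0 < num →
    shiftGo (P ++ moved ++ List.replicate num 0 ++ tail) num (P.length + moved.length) tail.length =
      P ++ moved ++ tail ++ List.replicate num 0 := by
  induction tail with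
  | nil =>
    intro P moved num hnum
    simp [shiftGo]
  | cons x t ih =>
    intro P moved num hnum
    obtain ⟨m, rfl⟩ : ∃ m, num = m + 1 := ⟨num - 1, by omega⟩
    simp only [List.length_cons, shiftGo]
    have hg : (P ++ moved ++ List.replicate (m + 1) 0 ++ x :: t).getD (P.length + moved.length + (m + 1)) 0 = x := by
      rw [show P ++ moved ++ List.replicate (m + 1) 0 ++ x :: t
          = ((P ++ moved) ++ List.replicate (m + 1) 0) ++ x :: t from by simp]
      rw [show P.length + moved.length + (m + 1) = ((P ++ moved) ++ List.replicate (m + 1) 0).length from by simp; omega]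
      rw [getD_at_len]
    have e1 : (P ++ moved ++ List.replicate (m + 1) 0 ++ x :: t).set (P.length + moved.length) x
        = (P ++ moved) ++ x :: (List.replicate m 0 ++ x :: t) := by
      rw [show P ++ moved ++ List.replicate (m + 1) 0 ++ x :: t
          = (P ++ moved) ++ 0 :: (List.replicate m 0 ++ x :: t) from by simp [List.replicate_succ]]
      rw [show P.length + moved.length = (P ++ moved).length from by simp]
      rw [set_at_len]
    have e2 : ((P ++ moved) ++ x :: (List.replicate m 0 ++ x :: t)).set (P.length + moved.length + (m + 1)) 0
        = P ++ (moved ++ [x]) ++ List.replicate (m + 1) 0 ++ t := by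
      rw [show (P ++ moved) ++ x :: (List.replicate m 0 ++ x :: t)
          = ((P ++ moved ++ [x]) ++ List.replicate m 0) ++ x :: t from by simp]
      rw [show P.length + moved.length + (m + 1) = ((P ++ moved ++ [x]) ++ List.replicate m 0).length from by simp; omega]
      rw [set_at_len]
      simp [List.replicate_succ']
    rw [hg, e1, e2]
    rw [show P.length + moved.length + 1 = P.length + (moved ++ [x]).length from by simp; omega]
    rw [ih P (moved ++ [x]) (m + 1) (by omega)]
    simp

theorem shift_tiles_left_inv (P tail : List Int) (num : Nat) (h : 0 < num) :
    shift_tiles_left (P ++ List.replicate num 0 ++ tail) num P.length = P ++ tail ++ List.replicate num 0 := by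
  unfold shift_tiles_left
  have h1 : (P ++ List.replicate num 0 ++ tail).length - num - P.length = tail.length := by
    simp
    omega
  rw [h1]
  have h2 := shiftGo_inv tail P [] num h
  simpa using h2

theorem mergeLoop_eq (n : Nat) : ∀ (suf pre : List Int), suf.length = n →
    mergeLoop (pre ++ suf) pre.length (suf.length - 1) = pre ++ mspec suf := by
  induction n with
  | zero =>
    intro suf pre h
    rw [List.eq_nil_of_length_eq_zero h]
    simp [mergeLoop, mspec]
  | succ n ih =>
    intro suf pre h
    cases suf with
    | nil => simp at h
    | cons v rest =>
      cases rest with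
      | nil =>
        rw [show ([v] : List Int).length - 1 = 0 from by simp]
        simp only [mergeLoop]
        by_cases hv : v = 0
        · subst hv; simp [mspec]
        · simp [mspec, hv, firstNZ]
      | cons w t =>
        have hlen : (w :: t).length = n := by simp at h ⊢; omega
        rw [show (v :: w :: t).length - 1 = ((w :: t).length - 1) + 1 from by simp]
        simp only [mergeLoop]
        have hsa : same_after_tile pre.length (pre ++ v :: w :: t) =
            match firstNZ (w :: t) with
            | none => none
            | some x => if x = v then some ((pre ++ [v]).length + leadZ (w :: t)) else none := by
          unfold same_after_tile
          rw [getD_at_len]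
          rw [append_cons_eq, show pre.length + 1 = (pre ++ [v]).length from by simp]
          exact sameAfterGo_eq (w :: t) (pre ++ [v]) v _ (by simp; omega)
        rw [hsa]
        cases hf : firstNZ (w :: t) with
        | none =>
          rw [append_cons_eq pre (w :: t) v, show pre.length + 1 = (pre ++ [v]).length from by simp]
          rw [ih (w :: t) (pre ++ [v]) hlen]
          by_cases hv : v = 0
          · subst hv; simp [mspec]
          · simp [mspec, hv, hf]
        | some x =>
          by_cases hxv : x = v
          · subst hxv
            have hv0 : x ≠ 0 := firstNZ_ne_zero hf
            simp only [if_true]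
            rw [getD_at_len]
            rw [set_at_len pre (w :: t) x (2 * x)]
            rw [append_cons_eq pre (w :: t) (2 * x)]
            rw [show (pre ++ [x]).length = (pre ++ [2 * x]).length from by simp]
            rw [set_at_len_add]
            rw [set_leadZ hf]
            rw [show pre.length + 1 = (pre ++ [2 * x]).length from by simp]
            rw [show (w :: t).length - 1 = (zeroFirstNZ (w :: t)).length - 1 from by rw [length_zeroFirstNZ]]
            rw [ih (zeroFirstNZ (w :: t)) (pre ++ [2 * x]) (by rw [length_zeroFirstNZ]; exact hlen)]
            simp only [mspec, if_neg hv0, hf]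
            simp
          · simp only [if_neg hxv]
            rw [append_cons_eq pre (w :: t) v, show pre.length + 1 = (pre ++ [v]).length from by simp]
            rw [ih (w :: t) (pre ++ [v]) hlen]
            by_cases hv : v = 0
            · subst hv; simp [mspec]
            · simp [mspec, hv, hf, hxv]

theorem shiftLoop_eq (n : Nat) : ∀ (suf pre : List Int), suf.length = n →
    shiftLoop (pre ++ suf) pre.length suf.length =
      pre ++ suf.filter (fun v => v != 0) ++
        List.replicate (suf.length - (suf.filter (fun v => v != 0)).length) 0 := by
  induction n with
  | zero =>
    intro suf pre h
    rw [List.eq_nil_of_length_eq_zero h]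
    simp [shiftLoop]
  | succ n ih =>
    intro suf pre h
    cases suf with
    | nil => simp at h
    | cons v rest =>
      have hlen : rest.length = n := by simp at h; omega
      simp only [List.length_cons, shiftLoop]
      have hclz : count_leading_zeros (pre ++ v :: rest) pre.length =
          match firstNZ (v :: rest) with
          | none => 0
          | some _ => leadZ (v :: rest) := by
        unfold count_leading_zeros
        rw [show (pre ++ v :: rest).length - pre.length = (v :: rest).length from by simp]
        rw [clzGo_eq (v :: rest) pre (v :: rest).length 0 (by simp)]
        simp
      rw [hclz]
      cases hf : firstNZ (v :: rest) with
      | none =>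
        have hv : v = 0 := by
          by_contra hv
          simp [firstNZ, hv] at hf
        have hfr : firstNZ rest = none := by simpa [firstNZ, hv] using hf
        rw [if_neg (by simp)]
        rw [append_cons_eq pre rest v, show pre.length + 1 = (pre ++ [v]).length from by simp]
        rw [ih rest (pre ++ [v]) hlen]
        have hfe : rest.filter (fun v => v != 0) = [] := firstNZ_none_filter hfr
        subst hv
        simp [hfe, List.replicate_succ]
      | some x =>
        have hx0 : x ≠ 0 := firstNZ_ne_zero hf
        by_cases hv : v = 0
        · -- leading zeros at the head: a real shift happens
          have hz : leadZ (v :: rest) = leadZ rest + 1 := by simp [leadZ, hv]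
          obtain ⟨t, hdec⟩ := firstNZ_decomp hf
          rw [hz] at hdec
          rw [if_pos (by simp [hz])]
          have hshift : shift_tiles_left (pre ++ v :: rest) (leadZ (v :: rest)) pre.length
              = pre ++ x :: (t ++ List.replicate (leadZ rest + 1) 0) := by
            rw [hz]
            rw [show pre ++ v :: rest = pre ++ List.replicate (leadZ rest + 1) 0 ++ (x :: t) from by
              rw [hdec]; simp]
            rw [shift_tiles_left_inv pre (x :: t) (leadZ rest + 1) (by omega)]
            simp
          rw [hshift]
          rw [show pre ++ x :: (t ++ List.replicate (leadZ rest + 1) 0)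
              = (pre ++ [x]) ++ (t ++ List.replicate (leadZ rest + 1) 0) from by simp]
          rw [show pre.length + 1 = (pre ++ [x]).length from by simp]
          have hlen2 := congrArg List.length hdec
          simp only [List.length_cons, List.length_append, List.length_replicate] at hlen2
          rw [show rest.length = (t ++ List.replicate (leadZ rest + 1) 0).length from by simp; omega]
          rw [ih (t ++ List.replicate (leadZ rest + 1) 0) (pre ++ [x]) (by simp; omega)]
          have hfil : (v :: rest).filter (fun v => v != 0) = x :: t.filter (fun v => v != 0) := by
            rw [hdec]
            simp [List.filter_append, hx0]
          rw [hfil]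
          have hlt := List.length_filter_le (fun v => v != 0) t
          simp [List.filter_append]
        · -- head nonzero: no shift
          have hz : leadZ (v :: rest) = 0 := by simp [leadZ, hv]
          rw [hz, if_neg (by simp)]
          rw [append_cons_eq pre rest v, show pre.length + 1 = (pre ++ [v]).length from by simp]
          rw [ih rest (pre ++ [v]) hlen]
          simp [hv]

theorem length_mspec (l : List Int) : (mspec l).length = l.length := by
  induction l using mspec.induct <;> simp [mspec, *, length_zeroFirstNZ]

theorem filter_head_tail {l : List Int} {x : Int} (h : firstNZ l = some x) :
    l.filter (fun v => v != 0) = x :: (l.filter (fun v => v != 0)).tail := by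
  rw [firstNZ_eq_head_filter] at h
  cases hf : l.filter (fun v => v != 0) with
  | nil => rw [hf] at h; simp at h
  | cons a t => rw [hf] at h; simp at h; simp [h]

theorem filter_mspec (l : List Int) :
    (mspec l).filter (fun v => v != 0) = pairMerge (l.filter (fun v => v != 0)) := by
  induction l using mspec.induct with
  | case1 => simp [mspec, pairMerge]
  | case2 t ih => simp [mspec, ih]
  | case3 x t hx hf ih =>
    have hft : t.filter (fun v => v != 0) = [] := firstNZ_none_filter hf
    rw [hft] at ih
    simp [mspec, hx, hf, ih, hft, pairMerge]
  | case4 t x hf hx0 ih =>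
    simp only [mspec, if_neg hx0, hf, List.filter_cons]
    have h2 : (2 * x != 0) = true := by simp [hx0]
    rw [filter_head_tail hf]
    simp [h2, ih, filter_zeroFirstNZ, pairMerge, hx0]
  | case5 x t hx x1 hf hne ih =>
    have hx10 : x1 ≠ 0 := firstNZ_ne_zero hf
    simp only [mspec, if_neg hx, hf, if_neg hne, List.filter_cons]
    have hxx : x ≠ x1 := fun h => hne h.symm
    rw [filter_head_tail hf] at ih ⊢
    simp [hx, ih, pairMerge, hxx]

theorem mergeRowGo_eq (xs : List Int) : ∀ (last : Option Int),
    mergeRowGo xs last = pairMerge (last.toList ++ xs.filter (fun v => v != 0)) := by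
  induction xs with
  | nil => intro last; cases last <;> simp [mergeRowGo, pairMerge]
  | cons v rest ih =>
    intro last
    simp only [mergeRowGo, List.filter_cons]
    by_cases hv : v = 0
    · simp [hv, ih]
    · cases last with
      | none => simp [hv, ih]
      | some l =>
        by_cases hl : l = v
        · simp [hv, hl, ih, pairMerge]
        · simp [hv, hl, ih, pairMerge]

theorem row_eq (r : List Int) :
    (let m := mergeLoop r 0 (r.length - 1); shiftLoop m 0 m.length) =
      mergeRowGo r none ++ List.replicate (r.length - (mergeRowGo r none).length) 0 := by
  have hm : mergeLoop r 0 (r.length - 1) = mspec r := by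
    have h := mergeLoop_eq r.length r [] rfl
    simpa using h
  have hs := shiftLoop_eq (mspec r).length (mspec r) [] rfl
  simp only [List.nil_append, List.length_nil] at hs
  show shiftLoop (mergeLoop r 0 (r.length - 1)) 0 (mergeLoop r 0 (r.length - 1)).length = _
  rw [hm, hs, filter_mspec, length_mspec, mergeRowGo_eq r none]
  simp

-- ===== VERDICT (by name: the statement is the Claim_ definition above) =====
theorem move_board_horizontal_spec : Claim_equal_move_board_horizontal := by
  intro board _
  unfold Spec_move_board_horizontal move_board_horizontal move_board_horizontal_alt
  exact List.map_congr_left (fun r _ => row_eq r)
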